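-- pv_equiv track=rewrite | github.com/minhnguyeenx/PYTHON_HIT_K15_2021 | Tuan3/Bai1.py | ss10
-- ===== SOURCE A (Python) =====
-- def ss10(s1: str, s2: str):
--     '''
--     :params:
--     input:
--         hai số cần so sánh
--     output:
--         nếu hai số đó có vị trí số '1',số '0' giống nhau, thì nó là 2 điểm 10
--         tương tự nhau -> return true
--         không thì -> return false
--     '''
--     set1 = set() #lưu vị trí i của số 1, số 0 của số đầu tiên
--     set2 = set() #lưu vị trí i của số 1, số 0 của số thứ 2
--     for i in range(len(s1)):
--         if s1[i] == '1' or s1[i] == '0':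
--             set1.add(i)
--     for i in range(len(s2)):
--         if s2[i] == '1' or s2[i] == '0':
--             set2.add(i)
--     if set1 == set2: #vị trí giống nhau thì return true
--         return True
--     return False     #không thì return false
-- ===== SOURCE B (Python) =====
-- def ss10(s1: str, s2: str):
--     # Single parallel scan: positions past a string's end count as non-binary.
--     n = max(len(s1), len(s2))
--     return all(
--         (i < len(s1) and (s1[i] == '0' or s1[i] == '1'))
--         == (i < len(s2) and (s2[i] == '0' or s2[i] == '1'))
--         for i in range(n)
--     )
-- ===== Notes on version B (the rewrite author's own statement) =====
-- stated objective: simpler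
-- what changed: Instead of building two index sets and comparing them, B walks both strings in one parallel indexed pass and checks that each position is a '0'/'1' position in s1 iff it is in s2.
import Mathlib
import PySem

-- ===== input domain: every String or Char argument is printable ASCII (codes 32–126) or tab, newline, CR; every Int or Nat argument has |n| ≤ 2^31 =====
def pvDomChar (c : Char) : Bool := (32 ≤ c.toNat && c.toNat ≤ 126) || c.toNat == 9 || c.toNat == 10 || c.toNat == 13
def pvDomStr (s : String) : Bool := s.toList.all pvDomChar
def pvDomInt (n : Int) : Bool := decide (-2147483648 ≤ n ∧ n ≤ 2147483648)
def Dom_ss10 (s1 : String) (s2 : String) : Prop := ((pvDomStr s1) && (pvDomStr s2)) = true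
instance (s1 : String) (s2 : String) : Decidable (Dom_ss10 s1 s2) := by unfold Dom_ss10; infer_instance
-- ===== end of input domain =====

-- B replaces A's two position-sets by one parallel indexed scan over both strings (objective: simpler).


-- ===== PORT A =====
-- s1[i] is ported as pyGetD on the char list; i is always in range here, so this is exact.
def ss10 (s1 : String) (s2 : String) : Bool :=
  let l1 := s1.toList
  let l2 := s2.toList
  let set1 : PySem.Set Int :=
    (PySem.List.pyRange 0 (PySem.Str.len s1) 1).foldl
      (fun st i =>
        if PySem.List.pyGetD l1 i ' ' == '1' || PySem.List.pyGetD l1 i ' ' == '0' then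
          PySem.Set.add st i
        else st)
      PySem.Set.empty
  let set2 : PySem.Set Int :=
    (PySem.List.pyRange 0 (PySem.Str.len s2) 1).foldl
      (fun st i =>
        if PySem.List.pyGetD l2 i ' ' == '1' || PySem.List.pyGetD l2 i ' ' == '0' then
          PySem.Set.add st i
        else st)
      PySem.Set.empty
  if PySem.Set.equal set1 set2 then true else false

-- ===== PORT B =====
-- 'i < len(s) and (s[i]=='0' or s[i]=='1')': the guard keeps the index in range, so pyGetD is exact.
def ss10Side (l : List Char) (i : Int) : Bool :=
  decide (i < (l.length : Int)) &&
    (PySem.List.pyGetD l i ' ' == '0' || PySem.List.pyGetD l i ' ' == '1')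

def ss10_alt (s1 : String) (s2 : String) : Bool :=
  (PySem.List.pyRange 0 (max (PySem.Str.len s1) (PySem.Str.len s2)) 1).all
    (fun i => ss10Side s1.toList i == ss10Side s2.toList i)

-- ===== PRECONDITION & SPEC =====
def Spec_ss10 (s1 : String) (s2 : String) (out : Bool) : Prop := out = ss10_alt s1 s2
instance (s1 : String) (s2 : String) (out : Bool) : Decidable (Spec_ss10 s1 s2 out) := by unfold Spec_ss10; infer_instance

-- ===== CLAIM (what is proved, stated in full; the proofs are below) =====
def Claim_equal_ss10 : Prop := ∀ (s1 : String) (s2 : String), Dom_ss10 s1 s2 → Spec_ss10 s1 s2 (ss10 s1 s2)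

-- ===== LEMMAS AND PROOFS =====

-- membership in A's filtered set-building fold
theorem mem_foldl_add_filter (p : Int → Bool) (y : Int) :
    ∀ (xs : List Int) (st : PySem.Set Int),
    (y ∈ xs.foldl (fun st i => if p i then PySem.Set.add st i else st) st) ↔
      y ∈ st ∨ (y ∈ xs ∧ p y = true) := by
  intro xs
  induction xs with
  | nil => intro st; simp
  | cons x xs ih =>
    intro st
    simp only [List.foldl_cons, ih]
    by_cases hx : p x = true
    · simp only [hx, if_pos, PySem.Set.mem_add, List.mem_cons]
      constructor
      · rintro (⟨h | rfl⟩ | ⟨h, hp⟩)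
        · exact Or.inl h
        · exact Or.inr ⟨Or.inl rfl, hx⟩
        · exact Or.inr ⟨Or.inr h, hp⟩
      · rintro (h | ⟨(rfl | h), hp⟩)
        · exact Or.inl (Or.inl h)
        · exact Or.inl (Or.inr rfl)
        · exact Or.inr ⟨h, hp⟩
    · simp only [hx, Bool.false_eq_true, List.mem_cons]
      constructor
      · rintro (h | ⟨h, hp⟩)
        · exact Or.inl h
        · exact Or.inr ⟨Or.inr h, hp⟩
      · rintro (h | ⟨(rfl | h), hp⟩)
        · exact Or.inl h
        · exact absurd hp hx
        · exact Or.inr ⟨h, hp⟩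

-- membership in A's set, characterised via B's per-position test
theorem mem_setA (l : List Char) (y : Int) :
    (y ∈ (PySem.List.pyRange 0 (l.length : Int) 1).foldl
      (fun st i =>
        if PySem.List.pyGetD l i ' ' == '1' || PySem.List.pyGetD l i ' ' == '0' then
          PySem.Set.add st i
        else st)
      PySem.Set.empty) ↔ (0 ≤ y ∧ ss10Side l y = true) := by
  rw [mem_foldl_add_filter]
  simp only [PySem.Set.empty, List.not_mem_nil, false_or, PySem.List.mem_pyRange_one, ss10Side]
  constructor
  · rintro ⟨⟨h0, hlt⟩, hp⟩
    refine ⟨h0, ?_⟩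
    simp only [Bool.and_eq_true, decide_eq_true_eq, Bool.or_eq_true] at *
    exact ⟨hlt, hp.symm.imp id id⟩
  · rintro ⟨h0, hp⟩
    simp only [Bool.and_eq_true, decide_eq_true_eq, Bool.or_eq_true] at hp
    exact ⟨⟨h0, hp.1⟩, by simp only [Bool.or_eq_true]; exact hp.2.symm.imp id id⟩

theorem side_false_of_ge (l : List Char) (i : Int) (h : (l.length : Int) ≤ i) :
    ss10Side l i = false := by
  simp only [ss10Side, Bool.and_eq_false_iff, decide_eq_false_iff_not, not_lt]
  exact Or.inl h

theorem ss10_spec' (s1 s2 : String) : ss10 s1 s2 = ss10_alt s1 s2 := by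
  unfold ss10 ss10_alt
  simp only [PySem.Str.len_eq]
  by_cases h : PySem.Set.equal
      ((PySem.List.pyRange 0 (s1.toList.length : Int) 1).foldl
        (fun st i =>
          if PySem.List.pyGetD s1.toList i ' ' == '1' || PySem.List.pyGetD s1.toList i ' ' == '0' then
            PySem.Set.add st i else st) PySem.Set.empty)
      ((PySem.List.pyRange 0 (s2.toList.length : Int) 1).foldl
        (fun st i =>
          if PySem.List.pyGetD s2.toList i ' ' == '1' || PySem.List.pyGetD s2.toList i ' ' == '0' then
            PySem.Set.add st i else st) PySem.Set.empty) = true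
  · rw [if_pos h]
    rw [PySem.Set.equal_iff] at h
    symm
    rw [List.all_eq_true]
    intro i hi
    rw [PySem.List.mem_pyRange_one] at hi
    have hmem := h i
    rw [mem_setA, mem_setA] at hmem
    have h1 : ss10Side s1.toList i = ss10Side s2.toList i := by
      cases hb1 : ss10Side s1.toList i <;> cases hb2 : ss10Side s2.toList i <;> try rfl
      · exact absurd (hmem.mpr ⟨hi.1, hb2⟩).2 (by simp [hb1])
      · exact absurd (hmem.mp ⟨hi.1, hb1⟩).2 (by simp [hb2])
    simp [h1]
  · rw [if_neg h]
    symm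
    rw [Bool.eq_false_iff]
    intro hall
    apply h
    rw [PySem.Set.equal_iff]
    intro y
    rw [mem_setA, mem_setA]
    rw [List.all_eq_true] at hall
    by_cases hy : 0 ≤ y
    · by_cases hmax : y < max (s1.toList.length : Int) (s2.toList.length : Int)
      · have := hall y (by rw [PySem.List.mem_pyRange_one]; exact ⟨hy, hmax⟩)
        simp only [beq_iff_eq] at this
        rw [this]
      · push Not at hmax
        rw [max_le_iff] at hmax
        rw [side_false_of_ge _ _ hmax.1, side_false_of_ge _ _ hmax.2]
    · have hy' : ¬ (0 ≤ y) := hy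
      simp [hy']

-- ===== VERDICT (by name: the statement is the Claim_ definition above) =====
theorem ss10_spec : Claim_equal_ss10 := by
  intro s1 s2 _
  exact ss10_spec' s1 s2
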